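-- pv_equiv track=rewrite | github.com/neroksi/fprize_final_cleanup | fprize/mtask_v2/src/wbf.py | get_uuids
-- ===== SOURCE A (Python) =====
-- def get_uuids(subs):
--     assert len(subs)
--
--     uuids = set(subs[0]["id"])
--
--     all_uuids = set(uuids)
--     common_uuids = set(uuids)
--
--     for sub in subs[1:]:
--         uuids = set(sub["id"])
--
--         all_uuids = all_uuids.union(uuids)
--         common_uuids = common_uuids.intersection(uuids)
--
--     common_uuids = sorted(common_uuids)
--     all_uuids = sorted(all_uuids)
--
--     return all_uuids, common_uuids
-- ===== SOURCE B (Python) =====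
-- def get_uuids(subs):
--     assert len(subs)
--
--     counts = {}
--     for sub in subs:
--         for u in dict.fromkeys(sub["id"]):
--             counts[u] = counts.get(u, 0) + 1
--
--     n = len(subs)
--     all_uuids = sorted(counts)
--     common_uuids = sorted(u for u, c in counts.items() if c == n)
--
--     return all_uuids, common_uuids
-- ===== Notes on version B (the rewrite author's own statement) =====
-- stated objective: alternative
-- what changed: Replaces the incremental set union/intersection over submissions by a single frequency table counting each submission's distinct ids: the table's keys give the union and the keys whose count equals len(subs) give the intersection.
import Mathlib
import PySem

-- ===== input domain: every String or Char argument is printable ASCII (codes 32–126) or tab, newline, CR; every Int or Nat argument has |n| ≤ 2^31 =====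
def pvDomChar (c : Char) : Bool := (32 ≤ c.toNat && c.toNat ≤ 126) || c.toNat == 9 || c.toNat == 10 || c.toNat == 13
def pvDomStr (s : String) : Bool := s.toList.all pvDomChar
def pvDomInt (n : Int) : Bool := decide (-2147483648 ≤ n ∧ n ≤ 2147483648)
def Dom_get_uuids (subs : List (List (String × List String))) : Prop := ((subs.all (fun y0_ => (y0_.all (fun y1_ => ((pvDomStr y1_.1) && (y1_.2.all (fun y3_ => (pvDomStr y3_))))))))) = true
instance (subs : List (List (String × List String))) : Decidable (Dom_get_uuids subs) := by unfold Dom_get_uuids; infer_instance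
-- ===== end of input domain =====

-- B replaces A's incremental set union/intersection by one frequency table over each
-- submission's distinct ids (keys = union, full-count keys = intersection); alternative
-- decomposition of the same cost, equal on all inputs where A returns (Pre_).


-- ===== PORT A =====
def get_uuids (subs : List (List (String × List String))) : List String × List String :=
  match subs with
  | [] => ([], [])   -- unreachable: 'assert len(subs)' raises here, excluded by Pre_
  | s0 :: rest =>
    let uuids : PySem.Set String := PySem.Set.ofList ((PySem.Dict.mk s0).getD "id" [])
    let p := rest.foldl
      (fun (ac : PySem.Set String × PySem.Set String) sub =>
        let u : PySem.Set String := PySem.Set.ofList ((PySem.Dict.mk sub).getD "id" [])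
        (PySem.Set.union ac.1 u, PySem.Set.inter ac.2 u))
      (PySem.Set.ofList uuids, PySem.Set.ofList uuids)
    (PySem.List.sorted p.1 (fun x => x) false, PySem.List.sorted p.2 (fun x => x) false)

-- ===== PORT B =====
def get_uuids_alt (subs : List (List (String × List String))) : List String × List String :=
  let counts : PySem.Dict String Int := subs.foldl
    (fun d sub =>
      (PySem.List.dedup ((PySem.Dict.mk sub).getD "id" [])).foldl
        (fun d u => d.insert u (d.getD u 0 + 1)) d)
    PySem.Dict.empty
  let n : Int := subs.length
  let all_uuids := PySem.List.sorted counts.keys (fun x => x) false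
  let common_uuids := PySem.List.sorted
      ((counts.items.filter (fun p => p.2 == n)).map (fun p => p.1)) (fun x => x) false
  (all_uuids, common_uuids)

-- ===== PRECONDITION & SPEC =====
-- Pre_ excludes exactly the inputs where A raises: the empty list (assert) and any
-- submission without an "id" key (KeyError).
def Pre_get_uuids (subs : List (List (String × List String))) : Prop :=
  subs ≠ [] ∧ ∀ sub ∈ subs, (PySem.Dict.mk sub).contains "id" = true
instance (subs : List (List (String × List String))) : Decidable (Pre_get_uuids subs) := by unfold Pre_get_uuids; infer_instance
def pvWitness_get_uuids : (List (List (String × List String))) := [[("id", ["a", "b"])], [("id", ["b"])]]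
def Spec_get_uuids (subs : List (List (String × List String))) (out : List String × List String) : Prop := out = get_uuids_alt subs
instance (subs : List (List (String × List String))) (out : List String × List String) : Decidable (Spec_get_uuids subs out) := by unfold Spec_get_uuids; infer_instance

-- ===== CLAIM (what is proved, stated in full; the proofs are below) =====
def Claim_equal_get_uuids : Prop := ∀ (subs : List (List (String × List String))), Dom_get_uuids subs → Pre_get_uuids subs → Spec_get_uuids subs (get_uuids subs)

-- ===== LEMMAS AND PROOFS =====

-- the distinct ids of one submission
def pvIds (sub : List (String × List String)) : List String :=
  PySem.List.dedup ((PySem.Dict.mk sub).getD "id" [])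

-- all distinct-per-submission ids, concatenated
def pvL (subs : List (List (String × List String))) : List String :=
  subs.flatMap pvIds

theorem pv_foldl_flatMap {α β γ : Type} (f : β → List α) (g : γ → α → γ) :
    ∀ (l : List β) (d : γ), l.foldl (fun d b => (f b).foldl g d) d = (l.flatMap f).foldl g d := by
  intro l
  induction l with
  | nil => intro d; rfl
  | cons b t ih => intro d; simp [List.flatMap_cons, List.foldl_append, ih]

theorem pv_counts_eq (subs : List (List (String × List String))) :
    (subs.foldl
      (fun d sub =>
        (PySem.List.dedup ((PySem.Dict.mk sub).getD "id" [])).foldl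
          (fun d u => d.insert u (d.getD u 0 + 1)) d)
      PySem.Dict.empty) = PySem.Dict.counter (pvL subs) := by
  exact (pv_foldl_flatMap (fun sub => PySem.List.dedup ((PySem.Dict.mk sub).getD "id" []))
    (fun (d : PySem.Dict String Int) u => d.insert u (d.getD u 0 + 1)) subs PySem.Dict.empty).trans
    (PySem.Dict.foldl_insert_getD_add_one_eq_counter _)

theorem pv_mem_L (subs : List (List (String × List String))) (x : String) :
    x ∈ pvL subs ↔ ∃ s ∈ subs, x ∈ pvIds s := by
  simp [pvL, List.mem_flatMap]

theorem pv_count_L (subs : List (List (String × List String))) (x : String) :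
    (pvL subs).count x = subs.countP (fun s => decide (x ∈ pvIds s)) := by
  induction subs with
  | nil => rfl
  | cons s t ih =>
    simp only [pvL, List.flatMap_cons, List.count_append, List.countP_cons]
    rw [← pvL, ih]
    by_cases h : x ∈ pvIds s
    · have h1 : (pvIds s).count x = 1 :=
        List.count_eq_one_of_mem (by simp [pvIds]) h
      simp [h, h1, Nat.add_comm]
    · have h0 : (pvIds s).count x = 0 := by
        simpa [List.count_eq_zero] using h
      simp [h, h0]

-- A's loop invariant: the running union/intersection are nodup with the expected members
theorem pv_loop (rest : List (List (String × List String))) :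
    ∀ (a c : PySem.Set String), a.Nodup → c.Nodup →
    let p := rest.foldl
      (fun (ac : PySem.Set String × PySem.Set String) sub =>
        let u : PySem.Set String := PySem.Set.ofList ((PySem.Dict.mk sub).getD "id" [])
        (PySem.Set.union ac.1 u, PySem.Set.inter ac.2 u)) (a, c)
    p.1.Nodup ∧ p.2.Nodup ∧
      (∀ x, x ∈ p.1 ↔ x ∈ a ∨ ∃ s ∈ rest, x ∈ pvIds s) ∧
      (∀ x, x ∈ p.2 ↔ x ∈ c ∧ ∀ s ∈ rest, x ∈ pvIds s) := by
  induction rest with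
  | nil => intro a c ha hc; exact ⟨ha, hc, by simp, by simp⟩
  | cons s t ih =>
    intro a c ha hc
    simp only [List.foldl_cons]
    have h := ih (PySem.Set.union a (PySem.Set.ofList ((PySem.Dict.mk s).getD "id" [])))
      (PySem.Set.inter c (PySem.Set.ofList ((PySem.Dict.mk s).getD "id" [])))
      (PySem.Set.nodup_union _ _ ha) (PySem.Set.nodup_inter _ _ hc)
    refine ⟨h.1, h.2.1, ?_, ?_⟩
    · intro x
      rw [h.2.2.1 x, PySem.Set.mem_union, PySem.Set.mem_ofList]
      simp only [List.mem_cons, pvIds, PySem.List.mem_dedup]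
      constructor
      · rintro ((hx | hx) | ⟨s', hs', hx⟩)
        · exact Or.inl hx
        · exact Or.inr ⟨s, Or.inl rfl, hx⟩
        · exact Or.inr ⟨s', Or.inr hs', hx⟩
      · rintro (hx | ⟨s', (rfl | hs'), hx⟩)
        · exact Or.inl (Or.inl hx)
        · exact Or.inl (Or.inr hx)
        · exact Or.inr ⟨s', hs', hx⟩
    · intro x
      rw [h.2.2.2 x, PySem.Set.mem_inter, PySem.Set.mem_ofList]
      simp only [List.mem_cons, pvIds, PySem.List.mem_dedup]
      constructor
      · rintro ⟨⟨hx, hxs⟩, hall⟩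
        exact ⟨hx, fun s' hs' => hs'.elim (fun e => e ▸ hxs) (hall s')⟩
      · rintro ⟨hx, hall⟩
        exact ⟨⟨hx, hall s (Or.inl rfl)⟩, fun s' hs' => hall s' (Or.inr hs')⟩

-- ===== VERDICT (by name: the statement is the Claim_ definition above) =====
theorem get_uuids_spec : Claim_equal_get_uuids := by
  intro subs _ hpre
  obtain ⟨hne, hkeys⟩ := hpre
  match subs, hne with
  | s0 :: rest, _ =>
    unfold Spec_get_uuids
    simp only [get_uuids, get_uuids_alt]
    rw [pv_counts_eq (s0 :: rest)]
    have hfirst : PySem.Set.ofList (PySem.Set.ofList ((PySem.Dict.mk s0).getD "id" []))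
        = PySem.Set.ofList ((PySem.Dict.mk s0).getD "id" []) :=
      PySem.Set.ofList_eq_self_of_nodup _ (PySem.Set.nodup_ofList _)
    rw [hfirst]
    have h := pv_loop rest (PySem.Set.ofList ((PySem.Dict.mk s0).getD "id" []))
      (PySem.Set.ofList ((PySem.Dict.mk s0).getD "id" []))
      (PySem.Set.nodup_ofList _) (PySem.Set.nodup_ofList _)
    obtain ⟨hn1, hn2, hm1, hm2⟩ := h
    set p := rest.foldl
      (fun (ac : PySem.Set String × PySem.Set String) sub =>
        (PySem.Set.union ac.1 (PySem.Set.ofList ((PySem.Dict.mk sub).getD "id" [])),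
         PySem.Set.inter ac.2 (PySem.Set.ofList ((PySem.Dict.mk sub).getD "id" []))))
      (PySem.Set.ofList ((PySem.Dict.mk s0).getD "id" []),
       PySem.Set.ofList ((PySem.Dict.mk s0).getD "id" [])) with hp
    -- union part
    have hperm1 : p.1.Perm (PySem.Dict.counter (pvL (s0 :: rest))).keys := by
      rw [PySem.Dict.keys_counter]
      refine (List.perm_ext_iff_of_nodup hn1 (PySem.Set.nodup_ofList _)).2 ?_
      intro x
      rw [hm1 x]
      simp only [PySem.Set.mem_ofList, pv_mem_L, pvIds, PySem.List.mem_dedup, List.mem_cons]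
      constructor
      · rintro (hx | ⟨s', hs', hx⟩)
        · exact ⟨s0, Or.inl rfl, hx⟩
        · exact ⟨s', Or.inr hs', hx⟩
      · rintro ⟨s', (rfl | hs'), hx⟩
        · exact Or.inl hx
        · exact Or.inr ⟨s', hs', hx⟩
    -- intersection part
    have hperm2 : p.2.Perm
        (((PySem.Dict.counter (pvL (s0 :: rest))).items.filter
          (fun q => q.2 == ((s0 :: rest).length : Int))).map (fun q => q.1)) := by
      rw [PySem.Dict.items_counter]
      rw [List.filter_map, List.map_map]
      simp only [Function.comp_def, List.map_id']
      refine (List.perm_ext_iff_of_nodup hn2 (List.Nodup.filter _ (PySem.Set.nodup_ofList _))).2 ?_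
      intro x
      rw [hm2 x]
      simp only [List.mem_filter, PySem.Set.mem_ofList]
      ·
        constructor
        · rintro ⟨hx0, hall⟩
          have hx0' : x ∈ pvIds s0 := by simpa [pvIds, PySem.List.mem_dedup] using hx0
          have hmemL : x ∈ pvL (s0 :: rest) := (pv_mem_L _ x).2 ⟨s0, List.mem_cons_self, hx0'⟩
          have hcnt : (pvL (s0 :: rest)).count x = (s0 :: rest).length := by
            rw [pv_count_L]
            refine List.countP_eq_length.2 ?_
            intro s hs
            rcases List.mem_cons.1 hs with rfl | hs
            · simpa using hx0'
            · simpa using hall s hs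
          exact ⟨hmemL, by simp [hcnt]⟩
        · rintro ⟨hyL, hyc⟩
          have hcnt : (pvL (s0 :: rest)).count x = (s0 :: rest).length := by
            have h1 : ((pvL (s0 :: rest)).count x : Int) = ((s0 :: rest).length : Int) := by
              simpa using hyc
            exact_mod_cast h1
          rw [pv_count_L] at hcnt
          have hall := List.countP_eq_length.1 hcnt
          have hy0 : x ∈ pvIds s0 := of_decide_eq_true (hall s0 List.mem_cons_self)
          refine ⟨by simpa [pvIds, PySem.List.mem_dedup] using hy0, ?_⟩
          intro s hs
          exact of_decide_eq_true (hall s (List.mem_cons_of_mem _ hs))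
    rw [PySem.List.sorted_eq_sorted_of_perm p.1 _ (fun x => x) (fun _ _ h => h) hperm1,
        PySem.List.sorted_eq_sorted_of_perm p.2 _ (fun x => x) (fun _ _ h => h) hperm2]
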